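-- pv_equiv track=rewrite | github.com/gkrankov/job-hunter-bot | generate_pdf.py | parse_tailored_cv
-- ===== SOURCE A (Python) =====
-- def parse_tailored_cv(text):
--     """
--     Parse the AI-generated tailored CV text into sections.
--     Returns a dictionary of sections.
--     """
--     sections = {}
--     current_section = "HEADER"
--     current_content = []
--
--     for line in text.split("\n"):
--         stripped = line.strip()
--
--         # Detect section headers (ALL CAPS lines or lines ending with :)
--         if stripped and (
--             stripped.isupper() or
--             stripped.endswith(":") and len(stripped.split()) <= 5 or
--             stripped.startswith("##")
--         ):
--             # Save previous section
--             if current_content: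
--                 sections[current_section] = "\n".join(current_content)
--             current_section = stripped.strip("#:_ ").upper()
--             current_content = []
--         else:
--             current_content.append(line)
--
--     # Save last section
--     if current_content:
--         sections[current_section] = "\n".join(current_content)
--
--     return sections
-- ===== SOURCE B (Python) =====
-- def parse_tailored_cv(text):
--     """
--     Parse the AI-generated tailored CV text into sections.
--     Returns a dictionary of sections.
--     """
--     def is_header(stripped):
--         return bool(stripped) and (
--             stripped.isupper() or
--             stripped.endswith(":") and len(stripped.split()) <= 5 or
--             stripped.startswith("##")
--         )
--
--     def segments(lines, label):
--         # recursively split: body before the next header, then recurse past it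
--         body = []
--         rest = lines
--         while rest and not is_header(rest[0].strip()):
--             body.append(rest[0])
--             rest = rest[1:]
--         if not rest:
--             return [(label, body)]
--         return [(label, body)] + segments(rest[1:], rest[0].strip().strip("#:_ ").upper())
--
--     sections = {}
--     for label, body in segments(text.split("\n"), "HEADER"):
--         if body:
--             sections[label] = "\n".join(body)
--     return sections
-- ===== Notes on version B (the rewrite author's own statement) =====
-- stated objective: alternative
-- what changed: A's single fused state-machine loop (dict + current label + content accumulator flushed at each header) is replaced by a two-phase decomposition: a recursive splitter that produces the list of (label, body) segments, then a separate pass that stores the non-empty segments into the dict.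
import Mathlib
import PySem

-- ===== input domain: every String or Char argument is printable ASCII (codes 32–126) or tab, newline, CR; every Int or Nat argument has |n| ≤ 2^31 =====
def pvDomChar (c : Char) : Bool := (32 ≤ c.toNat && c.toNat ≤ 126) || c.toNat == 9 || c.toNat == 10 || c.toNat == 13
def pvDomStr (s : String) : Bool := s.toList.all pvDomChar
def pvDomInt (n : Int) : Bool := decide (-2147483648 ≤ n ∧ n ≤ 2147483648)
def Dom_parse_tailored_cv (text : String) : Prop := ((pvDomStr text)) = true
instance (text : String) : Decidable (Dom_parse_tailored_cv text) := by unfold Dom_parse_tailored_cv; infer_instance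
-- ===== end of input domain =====

-- B replaces A's fused state-machine loop (dict + current label + content accumulator, flushed
-- on each header) by a two-phase decomposition: a recursive splitter producing the list of
-- (label, body) segments, then a separate pass storing the non-empty ones; objective: alternative.

-- hand port of Python str.isupper(), exact on ASCII (Dom): at least one cased (alphabetic)
-- character and no lowercase one; used by both ports (the condition is identical in both Pythons)
def pvIsUpperStr (s : String) : Bool :=
  s.toList.any PySem.Chars.isalpha && !(s.toList.any PySem.Chars.islower)

-- the header test of both Pythons, applied to the stripped line
def pvIsHeader (stripped : String) : Bool :=
  !(stripped == "") &&
    (pvIsUpperStr stripped ||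
     (PySem.Str.endswith stripped ":" && decide ((PySem.Str.split₀ stripped).length ≤ 5)) ||
     PySem.Str.startswith stripped "##")

-- stripped.strip("#:_ ").upper(), the normalized section label (both Pythons)
def pvNorm (stripped : String) : String :=
  PySem.Str.upper (PySem.Str.stripChars stripped "#:_ ")

-- ===== PORT A =====
-- loop body of A: state = (sections, current_section, current_content)
def pvStepA (st : PySem.Dict String String × String × List String) (line : String) :
    PySem.Dict String String × String × List String :=
  let stripped := PySem.Str.strip line
  if pvIsHeader stripped then
    ((if st.2.2.isEmpty then st.1
      else PySem.Dict.insert st.1 st.2.1 (PySem.Str.join "\n" st.2.2)),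
     pvNorm stripped, [])
  else
    (st.1, st.2.1, st.2.2 ++ [line])

def parse_tailored_cv (text : String) : List (String × String) :=
  let lines := (PySem.Str.split? text "\n").getD []   -- sep "\n" ≠ "", never none
  let st := lines.foldl pvStepA (PySem.Dict.empty, "HEADER", [])
  -- save last section
  (if st.2.2.isEmpty then st.1
   else PySem.Dict.insert st.1 st.2.1 (PySem.Str.join "\n" st.2.2)).items

-- ===== PORT B =====
-- Source B's inner while loop: peel off the body lines before the next header
def pvSpanB (acc : List String) : List String → List String × List String
  | [] => (acc, [])
  | l :: tl =>
    if pvIsHeader (PySem.Str.strip l) then (acc, l :: tl) else pvSpanB (acc ++ [l]) tl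

-- needed by pvSegments' termination
theorem pvSpanB_snd_le (acc : List String) (l : List String) :
    (pvSpanB acc l).2.length ≤ l.length := by
  induction l generalizing acc with
  | nil => simp [pvSpanB]
  | cons x tl ih =>
    simp only [pvSpanB]
    split
    · simp
    · exact (ih (acc ++ [x])).trans (by simp)

-- Source B's segments: the list of (label, body) chunks, recursing past each header line
def pvSegments (lines : List String) (label : String) : List (String × List String) :=
  match h : pvSpanB [] lines with
  | (body, []) => [(label, body)]
  | (body, hd :: tl) => (label, body) :: pvSegments tl (pvNorm (PySem.Str.strip hd))
termination_by lines.length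
decreasing_by
  have := pvSpanB_snd_le [] lines
  rw [h] at this
  simp at this
  omega

-- storing pass of Source B: skip empty bodies, later duplicate labels overwrite
def pvStore (sections : PySem.Dict String String) (seg : String × List String) :
    PySem.Dict String String :=
  if seg.2.isEmpty then sections
  else PySem.Dict.insert sections seg.1 (PySem.Str.join "\n" seg.2)

def parse_tailored_cv_alt (text : String) : List (String × String) :=
  let lines := (PySem.Str.split? text "\n").getD []   -- sep "\n" ≠ "", never none
  ((pvSegments lines "HEADER").foldl pvStore PySem.Dict.empty).items

-- ===== PRECONDITION & SPEC =====
def Spec_parse_tailored_cv (text : String) (out : List (String × String)) : Prop := out = parse_tailored_cv_alt text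
instance (text : String) (out : List (String × String)) : Decidable (Spec_parse_tailored_cv text out) := by unfold Spec_parse_tailored_cv; infer_instance

-- ===== CLAIM (what is proved, stated in full; the proofs are below) =====
def Claim_equal_parse_tailored_cv : Prop := ∀ (text : String), Dom_parse_tailored_cv text → Spec_parse_tailored_cv text (parse_tailored_cv text)

-- ===== LEMMAS AND PROOFS =====

-- folding pvStore over the segments of `lines`, unfolded one splitter step
theorem pvSegments_foldl (lines : List String) (cur : String) (d : PySem.Dict String String) :
    (pvSegments lines cur).foldl pvStore d =
      match pvSpanB [] lines with
      | (body, []) => pvStore d (cur, body)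
      | (body, hd :: tl) =>
          (pvSegments tl (pvNorm (PySem.Str.strip hd))).foldl pvStore (pvStore d (cur, body)) := by
  rw [pvSegments]
  rcases hsp : pvSpanB [] lines with ⟨body, rest⟩
  cases rest <;> simp [List.foldl]

-- the central invariant: A's fused loop, started in an arbitrary state, computes the fold of
-- pvStore over the remaining segments (with the pending content as the splitter's accumulator)
theorem pvMain (lines : List String) (acc : List String) (cur : String)
    (d : PySem.Dict String String) :
    (let st := lines.foldl pvStepA (d, cur, acc)
     if st.2.2.isEmpty then st.1
     else PySem.Dict.insert st.1 st.2.1 (PySem.Str.join "\n" st.2.2)) =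
      match pvSpanB acc lines with
      | (body, []) => pvStore d (cur, body)
      | (body, hd :: tl) =>
          (pvSegments tl (pvNorm (PySem.Str.strip hd))).foldl pvStore (pvStore d (cur, body)) := by
  induction lines generalizing acc cur d with
  | nil => simp [pvSpanB, pvStore]
  | cons l tl ih =>
    simp only [List.foldl, pvSpanB]
    by_cases hH : pvIsHeader (PySem.Str.strip l) = true
    · simp only [pvStepA, hH, if_pos]
      rw [ih [] (pvNorm (PySem.Str.strip l)) _]
      rw [pvSegments_foldl tl (pvNorm (PySem.Str.strip l)) (pvStore d (cur, acc))]
      simp [pvStore]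
    · simp only [Bool.not_eq_true] at hH
      simp only [pvStepA, hH, Bool.false_eq_true, if_false]
      exact ih (acc ++ [l]) cur d

-- ===== VERDICT (by name: the statement is the Claim_ definition above) =====
theorem parse_tailored_cv_spec : Claim_equal_parse_tailored_cv := by
  intro text _
  show parse_tailored_cv text = parse_tailored_cv_alt text
  have h := pvMain ((PySem.Str.split? text "\n").getD []) [] "HEADER" PySem.Dict.empty
  rw [← pvSegments_foldl] at h
  exact congrArg PySem.Dict.items h
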